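-- pv_equiv track=rewrite | github.com/Dou-Feng/leetcode_practice | python/isValidFunc.py | sparse_name
-- ===== SOURCE A (Python) =====
-- def isletter(c):
-- 	return ord('a') <= ord(c) <= ord('z') or ord('A') <= ord(c) <= ord('Z')
--
-- def sparse_name(line : str):
-- 	i = 0
-- 	while i < len(line):
-- 		if line[i] == '(':
-- 			return i
-- 		elif not isletter(line[i]) and line[i] != '_':
-- 			return 0
-- 		else:
-- 			i += 1
--
-- 	return i
-- ===== SOURCE B (Python) =====
-- def sparse_name(line: str):
--     # Split at the first '(' (if any); the answer is len(prefix) iff the prefix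
--     # is entirely name characters, else the invalid sentinel 0.
--     pre, _, _ = line.partition('(')
--     if all(('a' <= c <= 'z') or ('A' <= c <= 'Z') or c == '_' for c in pre):
--         return len(pre)
--     return 0
-- ===== Notes on version B (the rewrite author's own statement) =====
-- stated objective: simpler
-- what changed: B splits the line at the first opening parenthesis with str.partition and validates the whole prefix with one all() check, returning len(prefix) or 0, instead of A's while loop that branches per character with three separate exits.
import Mathlib
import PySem

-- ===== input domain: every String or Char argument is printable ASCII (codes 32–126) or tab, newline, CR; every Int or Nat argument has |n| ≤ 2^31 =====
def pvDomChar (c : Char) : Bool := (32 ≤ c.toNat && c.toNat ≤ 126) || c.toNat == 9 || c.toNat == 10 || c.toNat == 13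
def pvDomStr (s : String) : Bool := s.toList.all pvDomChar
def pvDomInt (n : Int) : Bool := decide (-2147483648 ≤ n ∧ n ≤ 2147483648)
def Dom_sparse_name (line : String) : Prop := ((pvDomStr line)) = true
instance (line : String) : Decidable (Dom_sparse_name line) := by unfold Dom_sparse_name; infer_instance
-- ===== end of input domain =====

-- B splits the line at the first '(' (str.partition) and validates the whole prefix at once,
-- instead of A's branch-per-character while loop with three exits; same cost, simpler.

-- ===== PORT A =====
def isletter (c : Char) : Bool :=
  ('a'.toNat ≤ c.toNat && c.toNat ≤ 'z'.toNat) || ('A'.toNat ≤ c.toNat && c.toNat ≤ 'Z'.toNat)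

-- A's while loop: remaining characters plus the running index i
def sparseGoA : List Char → Int → Int
  | [], i => i
  | c :: cs, i =>
    if c = '(' then i
    else if ¬ (isletter c = true) ∧ c ≠ '_' then 0
    else sparseGoA cs (i + 1)

def sparse_name (line : String) : Int := sparseGoA line.toList 0

-- ===== PORT B =====
-- Python's 'a' <= c <= 'z' etc. compare code points; Char ≤ does the same.
def nameCharB (c : Char) : Bool := ('a' ≤ c && c ≤ 'z') || ('A' ≤ c && c ≤ 'Z') || c == '_'

def sparse_name_alt (line : String) : Int :=
  -- pre, _, _ = line.partition('(') : pre is the longest prefix without '(' (exact)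
  let pre := line.toList.takeWhile (fun c => !(c == '('))
  -- all(... for c in pre)
  if pre.all nameCharB then (pre.length : Int) else 0

-- ===== PRECONDITION & SPEC =====
def Spec_sparse_name (line : String) (out : Int) : Prop := out = sparse_name_alt line
instance (line : String) (out : Int) : Decidable (Spec_sparse_name line out) := by unfold Spec_sparse_name; infer_instance

-- ===== CLAIM (what is proved, stated in full; the proofs are below) =====
def Claim_equal_sparse_name : Prop := ∀ (line : String), Dom_sparse_name line → Spec_sparse_name line (sparse_name line)

-- ===== LEMMAS AND PROOFS =====

-- A's per-character test and B's name-character predicate agree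
theorem nameCharB_iff (c : Char) : nameCharB c = true ↔ (isletter c = true ∨ c = '_') := by
  have hu : (c = '_') ↔ c.toNat = 95 :=
    ⟨by rintro rfl; rfl, fun h => Char.ext (UInt32.toNat_inj.mp h)⟩
  have h2 : ∀ (a b : Char), (a ≤ b) ↔ a.toNat ≤ b.toNat := fun _ _ => UInt32.le_iff_toNat_le
  simp only [nameCharB, isletter, Bool.or_eq_true, Bool.and_eq_true, decide_eq_true_eq, beq_iff_eq]
  rw [hu]
  simp only [h2, Char.reduceToNat]

-- A's loop computed from B's staged decomposition (prefix before the first '(', then one check)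
theorem sparseGoA_eq (cs : List Char) (i : Int) :
    sparseGoA cs i =
      (let pre := cs.takeWhile (fun c => !(c == '('));
       if pre.all nameCharB then i + pre.length else 0) := by
  induction cs generalizing i with
  | nil => simp [sparseGoA]
  | cons c cs ih =>
    by_cases hp : c = '('
    · subst hp; simp [sparseGoA]
    · by_cases hv : nameCharB c = true
      · have hl : ¬ (¬ (isletter c = true) ∧ c ≠ '_') := by
          rcases (nameCharB_iff c).mp hv with h | h
          · exact fun hc => hc.1 h
          · exact fun hc => hc.2 h
        simp only [sparseGoA, if_neg hp, if_neg hl, ih]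
        rw [List.takeWhile_cons_of_pos (by simp [hp])]
        simp only [List.all_cons, hv, Bool.true_and, List.length_cons]
        split
        · push_cast; ring
        · rfl
      · have hl : ¬ (isletter c = true) ∧ c ≠ '_' := by
          constructor
          · exact fun h => hv ((nameCharB_iff c).mpr (Or.inl h))
          · exact fun h => hv ((nameCharB_iff c).mpr (Or.inr h))
        simp [sparseGoA, hp, hl, hv]

-- ===== VERDICT (by name: the statement is the Claim_ definition above) =====
theorem sparse_name_spec : Claim_equal_sparse_name := by
  intro line _
  unfold Spec_sparse_name sparse_name sparse_name_alt
  rw [sparseGoA_eq]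
  simp
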